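-- pv_equiv track=rewrite | github.com/MIGO-OvO/usv_ros | scripts/pump_control_node.py | _validate_packet
-- ===== SOURCE A (Python) =====
-- HEADER1 = 0x55
--
-- HEADER2_ANGLE = 0xCC
--
-- HEADER2_PID = 0xAA
--
-- HEADER2_TEST = 0xBB
--
-- TAIL = 0x0A
--
-- def _validate_packet(data, packet_type, packet_size):
--     """验证数据包校验和。"""
--     if len(data) < packet_size:
--         return False
--     if data[0] != HEADER1 or data[1] != packet_type:
--         return False
--     if data[packet_size - 1] != TAIL:
--         return False
--
--     # 计算校验和
--     if packet_type == HEADER2_ANGLE: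
--         checksum = 0
--         for i in range(1, 18):
--             checksum ^= data[i]
--         return checksum == data[18]
--     elif packet_type == HEADER2_PID:
--         checksum = 0
--         for i in range(2, 27):
--             checksum ^= data[i]
--         return checksum == data[27]
--     elif packet_type == HEADER2_TEST:
--         checksum = 0
--         for i in range(2, 16):
--             checksum ^= data[i]
--         return checksum == data[16]
--
--     return False
-- ===== SOURCE B (Python) =====
-- HEADER1 = 0x55
-- HEADER2_ANGLE = 0xCC
-- HEADER2_PID = 0xAA
-- HEADER2_TEST = 0xBB
-- TAIL = 0x0A
--
--
-- def _xor_run(data, i, end):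
--     """XOR of data[i:end], computed recursively."""
--     if i >= end:
--         return 0
--     return data[i] ^ _xor_run(data, i + 1, end)
--
--
-- def _validate_packet(data, packet_type, packet_size):
--     """验证数据包校验和。"""
--     if len(data) < packet_size:
--         return False
--     if data[0] != HEADER1 or data[1] != packet_type:
--         return False
--     if data[packet_size - 1] != TAIL:
--         return False
--     if packet_type == HEADER2_ANGLE:
--         start, end = 1, 19
--     elif packet_type == HEADER2_PID:
--         start, end = 2, 28
--     elif packet_type == HEADER2_TEST:
--         start, end = 2, 17
--     else:
--         return False
--     # the packet is valid iff the window *including* its checksum byte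
--     # XORs to zero (x == y  <=>  x ^ y == 0)
--     return _xor_run(data, start, end) == 0
-- ===== Notes on version B (the rewrite author's own statement) =====
-- stated objective: alternative
-- what changed: Instead of accumulating a checksum in a loop and comparing it with the stored byte, B checks that the XOR of the window extended by the checksum byte self-cancels to zero, computed by a recursive helper (x == y iff x ^ y == 0); the compare-against-stored-byte step disappears.
import Mathlib
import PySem

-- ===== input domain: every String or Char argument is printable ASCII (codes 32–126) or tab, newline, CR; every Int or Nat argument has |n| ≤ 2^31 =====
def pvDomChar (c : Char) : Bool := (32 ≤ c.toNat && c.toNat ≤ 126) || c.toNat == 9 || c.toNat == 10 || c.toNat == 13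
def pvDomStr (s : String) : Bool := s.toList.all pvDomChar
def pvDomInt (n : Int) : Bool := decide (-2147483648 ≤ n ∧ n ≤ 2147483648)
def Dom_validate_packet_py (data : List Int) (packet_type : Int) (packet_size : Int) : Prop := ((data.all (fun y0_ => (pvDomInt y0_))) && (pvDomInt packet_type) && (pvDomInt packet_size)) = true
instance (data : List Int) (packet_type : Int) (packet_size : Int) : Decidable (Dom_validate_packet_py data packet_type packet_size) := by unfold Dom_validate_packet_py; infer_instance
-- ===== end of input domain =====

-- B replaces A's accumulate-then-compare checksum loops by the self-cancelling-XOR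
-- characterisation: the packet is valid iff the XOR of the window extended by its
-- checksum byte is zero, computed by a recursive helper; objective: alternative.

-- ===== PORT A =====
def validate_packet_py (data : List Int) (packet_type : Int) (packet_size : Int) : Bool :=
  if (data.length : Int) < packet_size then false
  else
    match PySem.List.pyGet? data 0 with
    | none => false
    | some d0 =>
      if d0 != 85 then false
      else
        match PySem.List.pyGet? data 1 with
        | none => false
        | some d1 =>
          if d1 != packet_type then false
          else
            match PySem.List.pyGet? data (packet_size - 1) with
            | none => false
            | some t =>
              if t != 10 then false
              else if packet_type == 204 then
                decide (some ((PySem.List.pyRange 1 18 1).foldl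
                  (fun c i => PySem.Int.bxor c (PySem.List.pyGetD data i 0)) 0) = PySem.List.pyGet? data 18)
              else if packet_type == 170 then
                decide (some ((PySem.List.pyRange 2 27 1).foldl
                  (fun c i => PySem.Int.bxor c (PySem.List.pyGetD data i 0)) 0) = PySem.List.pyGet? data 27)
              else if packet_type == 187 then
                decide (some ((PySem.List.pyRange 2 16 1).foldl
                  (fun c i => PySem.Int.bxor c (PySem.List.pyGetD data i 0)) 0) = PySem.List.pyGet? data 16)
              else false

-- ===== PORT B =====
-- recursive XOR of data[i:e] (Source B's _xor_run)
def pvXorRun (data : List Int) (i e : Int) : Int :=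
  if i ≥ e then 0
  else PySem.Int.bxor (PySem.List.pyGetD data i 0) (pvXorRun data (i + 1) e)
termination_by (e - i).toNat
decreasing_by omega

def validate_packet_py_alt (data : List Int) (packet_type : Int) (packet_size : Int) : Bool :=
  if (data.length : Int) < packet_size then false
  else
    match PySem.List.pyGet? data 0 with
    | none => false
    | some d0 =>
      if d0 != 85 then false
      else
        match PySem.List.pyGet? data 1 with
        | none => false
        | some d1 =>
          if d1 != packet_type then false
          else
            match PySem.List.pyGet? data (packet_size - 1) with
            | none => false
            | some t =>
              if t != 10 then false
              else if packet_type == 204 then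
                decide (pvXorRun data 1 19 = 0)
              else if packet_type == 170 then
                decide (pvXorRun data 2 28 = 0)
              else if packet_type == 187 then
                decide (pvXorRun data 2 17 = 0)
              else false

-- ===== PRECONDITION & SPEC =====
-- Pre_ excludes exactly the inputs where the Python raises IndexError: a missing
-- data[0]/data[1], a tail index packet_size-1 outside Python's index range, or a
-- packet shorter than the checksum window of its recognised type.
def Pre_validate_packet_py (data : List Int) (packet_type : Int) (packet_size : Int) : Prop :=
  (data.length : Int) < packet_size ∨
  (1 ≤ data.length ∧
    (PySem.List.pyGet? data 0 = some 85 →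
      2 ≤ data.length ∧
      (PySem.List.pyGet? data 1 = some packet_type →
        (-(data.length : Int) ≤ packet_size - 1 ∧ packet_size - 1 < (data.length : Int)) ∧
        (PySem.List.pyGet? data (packet_size - 1) = some 10 →
          (packet_type = 204 → 19 ≤ data.length) ∧
          (packet_type = 170 → 28 ≤ data.length) ∧
          (packet_type = 187 → 17 ≤ data.length)))))
instance (data : List Int) (packet_type : Int) (packet_size : Int) : Decidable (Pre_validate_packet_py data packet_type packet_size) := by unfold Pre_validate_packet_py; infer_instance

def pvWitness_validate_packet_py : List Int × Int × Int := ([1], 0, 0)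

def Spec_validate_packet_py (data : List Int) (packet_type : Int) (packet_size : Int) (out : Bool) : Prop := out = validate_packet_py_alt data packet_type packet_size
instance (data : List Int) (packet_type : Int) (packet_size : Int) (out : Bool) : Decidable (Spec_validate_packet_py data packet_type packet_size out) := by unfold Spec_validate_packet_py; infer_instance

-- ===== CLAIM =====
def Claim_equal_validate_packet_py : Prop := ∀ (data : List Int) (packet_type : Int) (packet_size : Int), Dom_validate_packet_py data packet_type packet_size → Pre_validate_packet_py data packet_type packet_size → Spec_validate_packet_py data packet_type packet_size (validate_packet_py data packet_type packet_size)

-- ===== LEMMAS AND PROOFS =====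

theorem pv_bxor_eq_xor (a b : Int) : PySem.Int.bxor a b = Int.xor a b := by
  cases a <;> cases b <;> simp [PySem.Int.bxor, Int.xor, Int.negSucc_eq] <;> omega

theorem pv_bxor_assoc (a b c : Int) :
    PySem.Int.bxor (PySem.Int.bxor a b) c = PySem.Int.bxor a (PySem.Int.bxor b c) := by
  simp only [pv_bxor_eq_xor]
  cases a <;> cases b <;> cases c <;> simp [Int.xor, Nat.xor_assoc]

theorem pv_zero_bxor (a : Int) : PySem.Int.bxor 0 a = a := by
  rw [PySem.Int.bxor_comm]; exact PySem.Int.bxor_zero a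

-- x ^ y == 0 iff x == y: B's self-cancelling test equals A's comparison
theorem pv_bxor_cancel (a b : Int) : PySem.Int.bxor a b = 0 ↔ a = b := by
  constructor
  · intro h
    have h2 : PySem.Int.bxor (PySem.Int.bxor a b) b = PySem.Int.bxor 0 b := by rw [h]
    rwa [pv_bxor_assoc, PySem.Int.bxor_self, PySem.Int.bxor_zero, pv_zero_bxor] at h2
  · intro h; subst h; exact PySem.Int.bxor_self a

theorem pvXorRun_snoc (data : List Int) (a e : Int) (h : a ≤ e) :
    pvXorRun data a (e + 1) = PySem.Int.bxor (pvXorRun data a e) (PySem.List.pyGetD data e 0) := by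
  obtain ⟨n, hn⟩ : ∃ n : Nat, e = a + n := ⟨(e - a).toNat, by omega⟩
  subst hn
  induction n generalizing a with
  | zero =>
    have e1 : pvXorRun data a (a + (0:Nat) + 1) = PySem.Int.bxor (PySem.List.pyGetD data a 0) (pvXorRun data (a + 1) (a + (0:Nat) + 1)) := by
      rw [pvXorRun]; rw [if_neg (by push_cast; omega)]
    have e2 : pvXorRun data (a + 1) (a + (0:Nat) + 1) = 0 := by
      rw [pvXorRun]; rw [if_pos (by push_cast; omega)]
    have e3 : pvXorRun data a (a + (0:Nat)) = 0 := by
      rw [pvXorRun]; rw [if_pos (by push_cast; omega)]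
    rw [e1, e2, e3, PySem.Int.bxor_zero, pv_zero_bxor]
    push_cast; ring_nf
  | succ n ih =>
    have e1 : pvXorRun data a (a + ((n:Nat)+1) + 1) = PySem.Int.bxor (PySem.List.pyGetD data a 0) (pvXorRun data (a + 1) (a + ((n:Nat)+1) + 1)) := by
      rw [pvXorRun]; rw [if_neg (by omega)]
    have e2 : pvXorRun data a (a + ((n:Nat)+1)) = PySem.Int.bxor (PySem.List.pyGetD data a 0) (pvXorRun data (a + 1) (a + ((n:Nat)+1))) := by
      rw [pvXorRun]; rw [if_neg (by omega)]
    have e3 := ih (a + 1) (by omega)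
    push_cast
    rw [e1, e2]
    rw [show a + ((n:Nat)+1) + 1 = (a + 1) + (n:Nat) + 1 by ring,
        show a + ((n:Nat)+1) = (a + 1) + (n:Nat) by ring]
    rw [e3, pv_bxor_assoc]

-- A's left fold over range(a, a+n) equals B's recursive run of the same window
theorem pv_foldl_eq_run (data : List Int) (n : Nat) : ∀ (a init : Int),
    (PySem.List.pyRange a (a + n) 1).foldl
      (fun c i => PySem.Int.bxor c (PySem.List.pyGetD data i 0)) init
    = PySem.Int.bxor init (pvXorRun data a (a + n)) := by
  induction n with
  | zero =>
    intro a init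
    rw [PySem.List.pyRange_one_eq_nil (by push_cast; omega)]
    rw [pvXorRun, if_pos (by push_cast; omega)]
    simp [PySem.Int.bxor_zero]
  | succ n ih =>
    intro a init
    rw [PySem.List.pyRange_one_cons (by push_cast; omega), List.foldl_cons]
    rw [show a + ((n+1 : Nat) : Int) = (a + 1) + (n : Nat) by push_cast; ring]
    rw [ih (a + 1)]
    have e1 : pvXorRun data a ((a + 1) + (n:Nat)) = PySem.Int.bxor (PySem.List.pyGetD data a 0) (pvXorRun data (a + 1) ((a + 1) + (n:Nat))) := by
      rw [pvXorRun]; rw [if_neg (by omega)]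
    rw [e1, ← pv_bxor_assoc]

-- one checksum branch: A's 'fold == data[idx]' equals B's 'run over [a, idx+1) == 0'
theorem pv_branch_eq (data : List Int) (a : Int) (n : Nat) (idx : Int)
    (hidx : idx = a + n) (hlen : idx.toNat < data.length) (ha : 0 ≤ a) :
    decide (some ((PySem.List.pyRange a idx 1).foldl
        (fun c i => PySem.Int.bxor c (PySem.List.pyGetD data i 0)) 0) = PySem.List.pyGet? data idx)
    = decide (pvXorRun data a (idx + 1) = 0) := by
  have h0 : 0 ≤ idx := by omega
  have hget : PySem.List.pyGet? data idx = some (data.getD idx.toNat 0) := by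
    rw [PySem.List.pyGet?_of_nonneg data h0, List.getElem?_eq_getElem hlen, List.getD_eq_getElem _ _ hlen]
  have hgetD : PySem.List.pyGetD data idx 0 = data.getD idx.toNat 0 := by
    simp [PySem.List.pyGetD, hget]
  rw [hget, hidx, pv_foldl_eq_run data n a 0, pv_zero_bxor]
  rw [pvXorRun_snoc data a (a + n) (by omega), ← hidx, hgetD]
  simp [pv_bxor_cancel]

-- ===== VERDICT =====
theorem validate_packet_py_spec : Claim_equal_validate_packet_py := by
  intro data pt ps _ hpre
  unfold Spec_validate_packet_py validate_packet_py validate_packet_py_alt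
  by_cases hlen : (data.length : Int) < ps
  · simp [hlen]
  · rw [if_neg hlen, if_neg hlen]
    cases h0 : PySem.List.pyGet? data 0 with
    | none => rfl
    | some d0 =>
      by_cases hd0 : d0 = 85
      · subst hd0
        simp only [bne_self_eq_false, Bool.false_eq_true, if_false]
        have hpre1 := (hpre.resolve_left hlen).2 h0
        cases h1 : PySem.List.pyGet? data 1 with
        | none => rfl
        | some d1 =>
          by_cases hd1 : d1 = pt
          · subst hd1
            simp only [bne_self_eq_false, Bool.false_eq_true, if_false]
            have hpre2 := (hpre1.2 h1).2
            cases ht : PySem.List.pyGet? data (ps - 1) with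
            | none => rfl
            | some t =>
              by_cases htl : t = 10
              · subst htl
                simp only [bne_self_eq_false, Bool.false_eq_true, if_false]
                have hpre3 := hpre2 ht
                by_cases h204 : d1 = 204
                · subst h204
                  have hn : 19 ≤ data.length := hpre3.1 rfl
                  simp only [beq_self_eq_true, if_true]
                  exact pv_branch_eq data 1 17 18 (by norm_num) (by omega) (by norm_num)
                · by_cases h170 : d1 = 170
                  · subst h170
                    have hn : 28 ≤ data.length := hpre3.2.1 rfl
                    simp only [show ((170 : Int) == 204) = false by decide, Bool.false_eq_true,
                               if_false, beq_self_eq_true, if_true]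
                    exact pv_branch_eq data 2 25 27 (by norm_num) (by omega) (by norm_num)
                  · by_cases h187 : d1 = 187
                    · subst h187
                      have hn : 17 ≤ data.length := hpre3.2.2 rfl
                      simp only [show ((187 : Int) == 204) = false by decide,
                                 show ((187 : Int) == 170) = false by decide,
                                 Bool.false_eq_true, if_false, beq_self_eq_true, if_true]
                      exact pv_branch_eq data 2 14 16 (by norm_num) (by omega) (by norm_num)
                    · simp [h204, h170, h187]
              · simp [htl]
          · simp [hd1]
      · simp [hd0]
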